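-- pv_equiv track=rewrite | github.com/grapheneaffiliate/h4-polytopic-attention | solve_arc_b15.py | solve_99fa7670
-- ===== SOURCE A (Python) =====
-- def solve_99fa7670(grid):
--     rows, cols = len(grid), len(grid[0])
--     out = [row[:] for row in grid]
--     # Find all non-zero cells
--     dots = []
--     for r in range(rows):
--         for c in range(cols):
--             if grid[r][c] != 0:
--                 dots.append((r, c, grid[r][c]))
--     for r, c, v in dots:
--         # Fill right from dot to right edge
--         for cc in range(c, cols):
--             out[r][cc] = v
--         # Fill down on right edge from dot row to bottom (or next dot's row)
--         # Find the next dot below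
--         next_r = rows  # default to bottom
--         for r2, c2, v2 in dots:
--             if r2 > r and r2 < next_r:
--                 next_r = r2
--         for rr in range(r, next_r):
--             out[rr][cols-1] = v
--     return out
-- ===== SOURCE B (Python) =====
-- def solve_99fa7670(grid):
--     rows, cols = len(grid), len(grid[0])
--     # nxt[k] = smallest row index >= k containing a non-zero cell (rows if none),
--     # built in one backward pass instead of scanning all dots per dot.
--     nxt = [rows] * (rows + 1)
--     for r in range(rows - 1, -1, -1):
--         nxt[r] = r if any(grid[r][c] != 0 for c in range(cols)) else nxt[r + 1]
--     out = [row[:] for row in grid]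
--     for r in range(rows):
--         for c in range(cols):
--             v = grid[r][c]
--             if v != 0:
--                 for cc in range(c, cols):
--                     out[r][cc] = v
--                 for rr in range(r, nxt[r + 1]):
--                     out[rr][cols - 1] = v
--     return out
-- ===== Notes on version B (the rewrite author's own statement) =====
-- stated objective: faster
-- what changed: B drops A's materialised dots list and its O(D) per-dot rescan for the next dot row, instead precomputing a next-dot-row table in one backward pass over the rows and streaming the grid row-major.
import Mathlib
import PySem

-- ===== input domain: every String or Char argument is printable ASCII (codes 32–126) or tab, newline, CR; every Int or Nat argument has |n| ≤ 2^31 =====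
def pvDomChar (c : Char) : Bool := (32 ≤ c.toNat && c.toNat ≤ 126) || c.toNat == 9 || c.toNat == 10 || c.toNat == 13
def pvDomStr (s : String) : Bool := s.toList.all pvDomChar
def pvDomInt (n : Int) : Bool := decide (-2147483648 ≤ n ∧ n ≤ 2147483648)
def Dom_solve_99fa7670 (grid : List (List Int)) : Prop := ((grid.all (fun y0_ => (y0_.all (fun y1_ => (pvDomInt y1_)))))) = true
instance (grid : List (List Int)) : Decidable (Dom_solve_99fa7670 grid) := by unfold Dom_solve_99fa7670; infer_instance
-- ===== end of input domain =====

-- B replaces A's per-dot scan over the whole dots list by a next-dot-row table built in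
-- one backward pass, and streams the grid instead of materialising the dots list (objective: faster).

-- out[r][c] = v (a no-op when out of range; all writes are in range under Pre_)
def pvSet2 (g : List (List Int)) (r c : Nat) (v : Int) : List (List Int) :=
  g.modify r (fun row => row.set c v)

-- ===== PORT A =====
def solve_99fa7670 (grid : List (List Int)) : List (List Int) :=
  let rows := grid.length
  let cols := (grid.headD []).length
  let dots := (List.range rows).foldl (fun acc r =>
      (List.range cols).foldl (fun acc c =>
        if (grid.getD r []).getD c 0 != 0 then
          acc ++ [(r, c, (grid.getD r []).getD c 0)]
        else acc) acc) []
  dots.foldl (fun out t =>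
      let out := (List.range' t.2.1 (cols - t.2.1)).foldl
          (fun o cc => pvSet2 o t.1 cc t.2.2) out
      let next_r := dots.foldl (fun nr t2 =>
          if t.1 < t2.1 ∧ t2.1 < nr then t2.1 else nr) rows
      (List.range' t.1 (next_r - t.1)).foldl
          (fun o rr => pvSet2 o rr (cols - 1) t.2.2) out) grid

-- ===== PORT B =====
def solve_99fa7670_alt (grid : List (List Int)) : List (List Int) :=
  let rows := grid.length
  let cols := (grid.headD []).length
  let nxt := ((List.range rows).reverse).foldl (fun nxt r =>
      nxt.set r (if (List.range cols).any (fun c => (grid.getD r []).getD c 0 != 0)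
                 then r else nxt.getD (r + 1) rows))
      (List.replicate (rows + 1) rows)
  (List.range rows).foldl (fun out r =>
    (List.range cols).foldl (fun out c =>
      let v := (grid.getD r []).getD c 0
      if v != 0 then
        let out := (List.range' c (cols - c)).foldl (fun o cc => pvSet2 o r cc v) out
        (List.range' r (nxt.getD (r + 1) rows - r)).foldl
            (fun o rr => pvSet2 o rr (cols - 1) v) out
      else out) out) grid

-- ===== PRECONDITION & SPEC =====
-- Pre_ excludes exactly the inputs where Python A raises IndexError: the empty grid
-- (grid[0]) and grids where some row is shorter than the first row (A reads grid[r][c]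
-- for c < len(grid[0]) and writes out[rr][cols-1]).  Python B raises on the same inputs.
def Pre_solve_99fa7670 (grid : List (List Int)) : Prop :=
  grid ≠ [] ∧ ∀ row ∈ grid, (grid.headD []).length ≤ row.length
instance (grid : List (List Int)) : Decidable (Pre_solve_99fa7670 grid) := by
  unfold Pre_solve_99fa7670; infer_instance
def pvWitness_solve_99fa7670 : List (List Int) := [[0, 3, 0], [0, 0, 0], [5, 0, 0]]

def Spec_solve_99fa7670 (grid : List (List Int)) (out : List (List Int)) : Prop := out = solve_99fa7670_alt grid
instance (grid : List (List Int)) (out : List (List Int)) : Decidable (Spec_solve_99fa7670 grid out) := by unfold Spec_solve_99fa7670; infer_instance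

-- ===== CLAIM (what is proved, stated in full; the proofs are below) =====
def Claim_equal_solve_99fa7670 : Prop := ∀ (grid : List (List Int)), Dom_solve_99fa7670 grid → Pre_solve_99fa7670 grid → Spec_solve_99fa7670 grid (solve_99fa7670 grid)

-- ===== LEMMAS AND PROOFS =====

-- cell (r, c) of the grid, 0-defaulted (both ports read cells exactly like this)
def pvCell (grid : List (List Int)) (r c : Nat) : Int := (grid.getD r []).getD c 0

-- "row r has a non-zero cell among the first cols columns"
def pvHasDot (grid : List (List Int)) (cols r : Nat) : Bool :=
  (List.range cols).any (fun c => pvCell grid r c != 0)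

-- first k' ≥ k with f k' = true, within fuel n (else k + n)
def pvFD (f : Nat → Bool) : Nat → Nat → Nat
  | 0, k => k
  | n + 1, k => if f k then k else pvFD f n (k + 1)

-- A's dots list, in closed form
def pvDots (grid : List (List Int)) (rows cols : Nat) : List (Nat × Nat × Int) :=
  (List.range rows).flatMap (fun r =>
    ((List.range cols).filter (fun c => pvCell grid r c != 0)).map
      (fun c => (r, c, pvCell grid r c)))

-- A's per-dot next_r scan, named
def pvMin (r : Nat) (l : List (Nat × Nat × Int)) (a : Nat) : Nat :=
  l.foldl (fun nr t2 => if r < t2.1 ∧ t2.1 < nr then t2.1 else nr) a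

lemma dots_eq (grid : List (List Int)) (rows cols : Nat) :
    (List.range rows).foldl (fun acc r =>
      (List.range cols).foldl (fun acc c =>
        if (grid.getD r []).getD c 0 != 0 then
          acc ++ [(r, c, (grid.getD r []).getD c 0)]
        else acc) acc) [] = pvDots grid rows cols := by
  have h : (List.range rows).foldl (fun acc r =>
      (List.range cols).foldl (fun acc c =>
        if (grid.getD r []).getD c 0 != 0 then
          acc ++ [(r, c, (grid.getD r []).getD c 0)]
        else acc) acc) []
      = (List.range rows).foldl (fun acc r =>
          acc ++ ((List.range cols).filter (fun c => pvCell grid r c != 0)).map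
            (fun c => (r, c, pvCell grid r c))) [] := by
    refine PySem.List.foldl_congr_mem _ _ _ _ ?_
    intro acc r _
    exact PySem.List.foldl_append_if (fun c => pvCell grid r c != 0)
      (fun c => (r, c, pvCell grid r c)) (List.range cols) acc
  rw [h, PySem.List.foldl_append_eq_flatMap]
  simp [pvDots]

lemma pvFD_ge (f : Nat → Bool) : ∀ n k, k ≤ pvFD f n k ∧ pvFD f n k ≤ k + n := by
  intro n
  induction n with
  | zero => intro k; simp [pvFD]
  | succ n ih =>
    intro k
    have := ih (k + 1)
    simp only [pvFD]; split <;> omega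

lemma pvFD_min (f : Nat → Bool) : ∀ n k x, k ≤ x → f x = true → pvFD f n k ≤ x := by
  intro n
  induction n with
  | zero => intro k x h _; simpa [pvFD] using h
  | succ n ih =>
    intro k x h hx
    simp only [pvFD]
    by_cases hk : f k = true
    · simp [hk]; omega
    · simp [hk]
      exact ih (k + 1) x (by rcases Nat.eq_or_lt_of_le h with h' | h' <;> [exact absurd (h' ▸ hx) hk; omega]) hx

lemma pvFD_mem (f : Nat → Bool) : ∀ n k, pvFD f n k = k + n ∨ f (pvFD f n k) = true := by
  intro n
  induction n with
  | zero => intro k; left; simp [pvFD]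
  | succ n ih =>
    intro k
    simp only [pvFD]
    by_cases hk : f k = true
    · right; simp [hk]
    · rcases ih (k + 1) with h | h <;> simp [hk] <;> [left; right] <;> [omega; exact h]

lemma mem_dots (grid : List (List Int)) (rows cols : Nat) :
    ∀ t ∈ pvDots grid rows cols, t.1 < rows ∧ pvHasDot grid cols t.1 = true := by
  intro t ht
  simp only [pvDots, List.mem_flatMap, List.mem_map, List.mem_filter, List.mem_range] at ht
  obtain ⟨r, hr, c, ⟨hc, hv⟩, rfl⟩ := ht
  refine ⟨hr, ?_⟩
  simp only [pvHasDot, List.any_eq_true, List.mem_range]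
  exact ⟨c, hc, hv⟩

lemma dots_of_hasDot (grid : List (List Int)) (rows cols : Nat) (x : Nat)
    (hx : x < rows) (hd : pvHasDot grid cols x = true) :
    ∃ t ∈ pvDots grid rows cols, t.1 = x := by
  simp only [pvHasDot, List.any_eq_true, List.mem_range] at hd
  obtain ⟨c, hc, hv⟩ := hd
  refine ⟨(x, c, pvCell grid x c), ?_, rfl⟩
  simp only [pvDots, List.mem_flatMap, List.mem_map, List.mem_filter, List.mem_range]
  exact ⟨x, hx, c, ⟨hc, hv⟩, rfl⟩

lemma pvMin_char (r : Nat) (l : List (Nat × Nat × Int)) : ∀ a : Nat,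
    (∀ t ∈ l, r < t.1 → pvMin r l a ≤ t.1) ∧ pvMin r l a ≤ a ∧
    (pvMin r l a = a ∨ ∃ t ∈ l, pvMin r l a = t.1 ∧ r < t.1) := by
  induction l with
  | nil => intro a; simp [pvMin]
  | cons t l ih =>
    intro a
    rw [show pvMin r (t :: l) a = pvMin r l (if r < t.1 ∧ t.1 < a then t.1 else a) from rfl]
    by_cases hc : r < t.1 ∧ t.1 < a
    · rw [if_pos hc]
      obtain ⟨ih1, ih2, ih3⟩ := ih t.1
      refine ⟨?_, by omega, ?_⟩
      · intro u hu hru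
        rcases List.mem_cons.mp hu with rfl | hu
        · exact ih2
        · exact ih1 u hu hru
      · rcases ih3 with h | ⟨u, hu, h1, h2⟩
        · exact Or.inr ⟨t, List.mem_cons_self, h, by omega⟩
        · exact Or.inr ⟨u, List.mem_cons_of_mem _ hu, h1, h2⟩
    · rw [if_neg hc]
      obtain ⟨ih1, ih2, ih3⟩ := ih a
      refine ⟨?_, ih2, ?_⟩
      · intro u hu hru
        rcases List.mem_cons.mp hu with rfl | hu
        · omega
        · exact ih1 u hu hru
      · rcases ih3 with h | ⟨u, hu, h1, h2⟩
        · exact Or.inl h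
        · exact Or.inr ⟨u, List.mem_cons_of_mem _ hu, h1, h2⟩

lemma A_next (grid : List (List Int)) (rows cols r : Nat) (hr : r < rows) :
    pvMin r (pvDots grid rows cols) rows
      = pvFD (pvHasDot grid cols) (rows - (r + 1)) (r + 1) := by
  obtain ⟨hmin, hle, hcases⟩ := pvMin_char r (pvDots grid rows cols) rows
  set m := pvMin r (pvDots grid rows cols) rows with hm
  set s := pvFD (pvHasDot grid cols) (rows - (r + 1)) (r + 1) with hs
  have hsge := pvFD_ge (pvHasDot grid cols) (rows - (r + 1)) (r + 1)
  have hsle : s ≤ rows := by omega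
  have h1 : m ≤ s := by
    rcases pvFD_mem (pvHasDot grid cols) (rows - (r + 1)) (r + 1) with h | h
    · omega
    · rcases Nat.eq_or_lt_of_le hsle with h' | h'
      · omega
      · obtain ⟨t, ht, ht1⟩ := dots_of_hasDot grid rows cols s h' h
        have := hmin t ht (by omega)
        omega
  have h2 : s ≤ m := by
    rcases hcases with h | ⟨t, ht, hmt, hrm⟩
    · omega
    · have := mem_dots grid rows cols t ht
      have := pvFD_min (pvHasDot grid cols) (rows - (r + 1)) (r + 1) t.1 (by omega) this.2
      omega
  omega

lemma getD_set_nat (l : List Nat) (i j v d : Nat) :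
    (l.set i v).getD j d = if i = j ∧ j < l.length then v else l.getD j d := by
  simp only [List.getD_eq_getElem?_getD, List.getElem?_set]
  by_cases h1 : i = j
  · subst h1
    by_cases h2 : i < l.length <;> simp [h2]
  · simp [h1]

lemma nxt_len (grid : List (List Int)) (rows cols : Nat) :
    ∀ (rs : List Nat) (l : List Nat), (rs.foldl (fun nxt r =>
      nxt.set r (if (List.range cols).any (fun c => (grid.getD r []).getD c 0 != 0)
                 then r else nxt.getD (r + 1) rows)) l).length = l.length := by
  intro rs
  induction rs with
  | nil => intro l; rfl
  | cons r rs ih => intro l; rw [List.foldl_cons, ih, List.length_set]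

lemma nxt_char (grid : List (List Int)) (rows cols : Nat) : ∀ n, n ≤ rows →
    ∀ k, k ≤ rows →
      (((List.range' (rows - n) n).reverse).foldl (fun nxt r =>
          nxt.set r (if (List.range cols).any (fun c => (grid.getD r []).getD c 0 != 0)
                     then r else nxt.getD (r + 1) rows))
        (List.replicate (rows + 1) rows)).getD k rows
      = if rows - n ≤ k then pvFD (pvHasDot grid cols) (rows - k) k else rows := by
  intro n
  induction n with
  | zero =>
    intro _ k hk
    simp only [Nat.sub_zero, List.range'_zero, List.reverse_nil, List.foldl_nil]
    rw [List.getD_replicate _ (by omega)]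
    split_ifs with h
    · have : k = rows := by omega
      subst this
      simp [pvFD]
    · rfl
  | succ n ih =>
    intro hn k hk
    have harith : rows - (n + 1) + 1 = rows - n := by omega
    have hsplit : List.range' (rows - (n + 1)) (n + 1) = (rows - (n + 1)) :: List.range' (rows - n) n := by
      rw [List.range'_succ, harith]
    rw [hsplit]
    simp only [List.reverse_cons, List.foldl_append, List.foldl_cons, List.foldl_nil]
    set j := rows - (n + 1) with hjdef
    set L := ((List.range' (rows - n) n).reverse).foldl (fun nxt r =>
          nxt.set r (if (List.range cols).any (fun c => (grid.getD r []).getD c 0 != 0)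
                     then r else nxt.getD (r + 1) rows))
        (List.replicate (rows + 1) rows) with hL
    have hlen : L.length = rows + 1 := by
      rw [hL, nxt_len]
      simp
    have hget : L.getD (j + 1) rows = pvFD (pvHasDot grid cols) (rows - (j + 1)) (j + 1) := by
      rw [hL, ih (by omega) (j + 1) (by omega), if_pos (by omega)]
    rw [hget]
    have hv : (if (List.range cols).any (fun c => (grid.getD j []).getD c 0 != 0)
               then j else pvFD (pvHasDot grid cols) (rows - (j + 1)) (j + 1))
        = pvFD (pvHasDot grid cols) (rows - j) j := by
      have : rows - j = (rows - (j + 1)) + 1 := by omega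
      rw [this]
      rfl
    rw [hv, getD_set_nat]
    by_cases hjk : j = k
    · subst hjk
      rw [if_pos ⟨rfl, by omega⟩, if_pos (by omega)]
    · rw [if_neg (by tauto), hL, ih (by omega) k hk]
      split_ifs with h1 h2 <;> first | rfl | (exfalso; omega)

lemma ports_eq (grid : List (List Int)) : solve_99fa7670 grid = solve_99fa7670_alt grid := by
  unfold solve_99fa7670 solve_99fa7670_alt
  simp only [dots_eq]
  rw [PySem.List.foldl_congr_mem (pvDots grid grid.length (grid.headD []).length) _
    (fun out t =>
      let out := (List.range' t.2.1 ((grid.headD []).length - t.2.1)).foldl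
          (fun o cc => pvSet2 o t.1 cc t.2.2) out
      (List.range' t.1 (pvFD (pvHasDot grid (grid.headD []).length)
            (grid.length - (t.1 + 1)) (t.1 + 1) - t.1)).foldl
          (fun o rr => pvSet2 o rr ((grid.headD []).length - 1) t.2.2) out) grid
    (by
      intro acc t ht
      have h := A_next grid grid.length (grid.headD []).length t.1
        (mem_dots grid grid.length (grid.headD []).length t ht).1
      simp only [pvMin] at h
      rw [h])]
  rw [show pvDots grid grid.length (grid.headD []).length =
      (List.range grid.length).flatMap (fun r =>
        ((List.range (grid.headD []).length).filter (fun c => pvCell grid r c != 0)).map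
          (fun c => (r, c, pvCell grid r c))) from rfl]
  rw [List.foldl_flatMap]
  rw [PySem.List.foldl_congr_mem (List.range grid.length) _
    (fun out r =>
      (List.range (grid.headD []).length).foldl (fun out c =>
        let v := (grid.getD r []).getD c 0
        if v != 0 then
          let out := (List.range' c ((grid.headD []).length - c)).foldl
              (fun o cc => pvSet2 o r cc v) out
          (List.range' r (pvFD (pvHasDot grid (grid.headD []).length)
                (grid.length - (r + 1)) (r + 1) - r)).foldl
              (fun o rr => pvSet2 o rr ((grid.headD []).length - 1) v) out
        else out) out) grid
    (by
      intro acc r _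
      rw [List.foldl_map, List.foldl_filter]
      rfl)]
  refine (PySem.List.foldl_congr_mem (List.range grid.length) _ _ grid ?_).symm
  intro acc r hr
  refine PySem.List.foldl_congr_mem (List.range (grid.headD []).length) _ _ acc ?_
  intro acc2 c _
  have hk := nxt_char grid grid.length (grid.headD []).length grid.length (le_refl _)
    (r + 1) (by simpa using List.mem_range.mp hr)
  simp only [Nat.sub_self, Nat.zero_le, if_pos] at hk
  rw [← List.range_eq_range'] at hk
  rw [hk]

-- ===== VERDICT (by name: the statement is the Claim_ definition above) =====
theorem solve_99fa7670_spec : Claim_equal_solve_99fa7670 := by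
  intro grid _ _
  unfold Spec_solve_99fa7670
  exact ports_eq grid
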